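-- pv_equiv track=rewrite | github.com/MrBrantCode/unitest_baseline | mut_generate/mist_train_cf/cf_41367/solution.py | is_system_unhealthy
-- ===== SOURCE A (Python) =====
-- from typing import List
--
-- def is_system_unhealthy(health_measurements: List[int], unhealthy_threshold: int) -> bool:
--     consecutive_unhealthy_count = 0
--     for measurement in health_measurements:
--         if measurement == 0:
--             consecutive_unhealthy_count += 1
--             if consecutive_unhealthy_count >= unhealthy_threshold:
--                 return True
--         else:
--             consecutive_unhealthy_count = 0
--     return False
-- ===== SOURCE B (Python) =====
-- from itertools import groupby
-- from typing import List
--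
-- def is_system_unhealthy(health_measurements: List[int], unhealthy_threshold: int) -> bool:
--     return any(is_zero and sum(1 for _ in run) >= unhealthy_threshold
--                for is_zero, run in groupby(health_measurements, key=lambda m: m == 0))
-- ===== Notes on version B (the rewrite author's own statement) =====
-- stated objective: idiomatic
-- what changed: Replaces the manual counter-with-early-return loop by splitting the sequence into maximal runs with itertools.groupby and checking whether any zero-run reaches the threshold.
import Mathlib
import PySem

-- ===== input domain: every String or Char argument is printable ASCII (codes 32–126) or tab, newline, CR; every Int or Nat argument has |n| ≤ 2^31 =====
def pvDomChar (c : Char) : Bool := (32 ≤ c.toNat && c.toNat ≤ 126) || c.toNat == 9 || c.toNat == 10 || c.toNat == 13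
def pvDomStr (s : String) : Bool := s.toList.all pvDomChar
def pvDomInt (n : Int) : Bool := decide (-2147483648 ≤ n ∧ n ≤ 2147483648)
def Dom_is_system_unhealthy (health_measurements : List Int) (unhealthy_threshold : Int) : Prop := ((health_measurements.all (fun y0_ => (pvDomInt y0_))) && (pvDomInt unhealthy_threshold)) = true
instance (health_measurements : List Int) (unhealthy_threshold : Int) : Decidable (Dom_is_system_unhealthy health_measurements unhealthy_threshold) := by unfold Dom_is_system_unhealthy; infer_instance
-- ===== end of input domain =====

-- B replaces A's manual counter loop by splitting the list into maximal runs (groupby) and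
-- checking whether some zero-run reaches the threshold (objective: idiomatic; return value only).

-- ===== PORT A =====
-- the for-loop with early return and the running counter, as structural recursion
def pvGoA (t : Int) : List Int → Int → Bool
  | [], _ => false
  | m :: rest, c =>
    if m == 0 then
      (if c + 1 ≥ t then true else pvGoA t rest (c + 1))
    else
      pvGoA t rest 0

def is_system_unhealthy (health_measurements : List Int) (unhealthy_threshold : Int) : Bool :=
  pvGoA unhealthy_threshold health_measurements 0

-- ===== PORT B =====
-- itertools.groupby with key (m == 0): maximal runs as (key, length) pairs
def pvGroups : List Int → List (Bool × Nat)
  | [] => []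
  | m :: rest =>
    let k := m == 0
    (k, (rest.takeWhile (fun x => (x == 0) == k)).length + 1)
      :: pvGroups (rest.dropWhile (fun x => (x == 0) == k))
termination_by l => l.length
decreasing_by
  simp only [List.length_cons]
  exact Nat.lt_succ_of_le (List.length_dropWhile_le _ _)

def is_system_unhealthy_alt (health_measurements : List Int) (unhealthy_threshold : Int) : Bool :=
  (pvGroups health_measurements).any (fun g => g.1 && decide ((g.2 : Int) ≥ unhealthy_threshold))

-- ===== PRECONDITION & SPEC =====
def Spec_is_system_unhealthy (health_measurements : List Int) (unhealthy_threshold : Int) (out : Bool) : Prop := out = is_system_unhealthy_alt health_measurements unhealthy_threshold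
instance (health_measurements : List Int) (unhealthy_threshold : Int) (out : Bool) : Decidable (Spec_is_system_unhealthy health_measurements unhealthy_threshold out) := by unfold Spec_is_system_unhealthy; infer_instance

-- ===== CLAIM (what is proved, stated in full; the proofs are below) =====
def Claim_equal_is_system_unhealthy : Prop := ∀ (health_measurements : List Int) (unhealthy_threshold : Int), Dom_is_system_unhealthy health_measurements unhealthy_threshold → Spec_is_system_unhealthy health_measurements unhealthy_threshold (is_system_unhealthy health_measurements unhealthy_threshold)

-- ===== LEMMAS AND PROOFS =====

-- A's loop over a block of nonzero measurements just resets the counter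
theorem pvGoA_nonzero (t : Int) (xs ys : List Int) (c : Int)
    (h : ∀ x ∈ xs, x ≠ 0) :
    pvGoA t (xs ++ ys) c = pvGoA t ys (if xs = [] then c else 0) := by
  induction xs generalizing c with
  | nil => simp
  | cons x xs ih =>
    have hx : x ≠ 0 := h x (by simp)
    simp only [List.cons_append, pvGoA, beq_iff_eq, if_neg hx]
    rw [ih _ (fun y hy => h y (List.mem_cons_of_mem _ hy))]
    split <;> simp

-- A's loop over a block of zeros: fires iff the block already pushes the counter past t
theorem pvGoA_zeros (t : Int) (xs ys : List Int) (c : Int)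
    (h : ∀ x ∈ xs, x = 0) :
    pvGoA t (xs ++ ys) c =
      if xs ≠ [] ∧ c + (xs.length : Int) ≥ t then true
      else pvGoA t ys (c + (xs.length : Int)) := by
  induction xs generalizing c with
  | nil => simp
  | cons x xs ih =>
    have hx : x = 0 := h x (by simp)
    simp only [List.cons_append, pvGoA, hx, beq_self_eq_true, if_true]
    rw [ih _ (fun y hy => h y (List.mem_cons_of_mem _ hy))]
    simp only [List.length_cons]
    by_cases h1 : c + 1 ≥ t
    · rw [if_pos h1, if_pos]
      constructor
      · simp
      · push_cast; omega
    · rw [if_neg h1]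
      by_cases h2 : xs = []
      · subst h2
        simp only [List.length_nil, ne_eq]
        rw [if_neg, if_neg]
        · ring_nf
        · push_cast; omega
        · simp only [Int.natCast_zero, add_zero]; omega
      · by_cases h3 : c + 1 + (xs.length : Int) ≥ t
        · rw [if_pos ⟨h2, h3⟩, if_pos]
          push_cast; constructor; · simp
          push_cast at h3 ⊢; omega
        · rw [if_neg, if_neg]
          · congr 1; push_cast; ring
          · push_cast; push_cast at h3; omega
          · exact fun hc => h3 hc.2

theorem pvMain (n : Nat) : ∀ (ms : List Int), ms.length ≤ n → ∀ t : Int,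
    pvGoA t ms 0 = (pvGroups ms).any (fun g => g.1 && decide ((g.2 : Int) ≥ t)) := by
  induction n with
  | zero =>
    intro ms hms t
    have : ms = [] := List.length_eq_zero_iff.mp (Nat.le_zero.mp hms)
    subst this
    simp [pvGoA, pvGroups]
  | succ n ih =>
    intro ms hms t
    match ms with
    | [] => simp [pvGoA, pvGroups]
    | m :: rest =>
      set k := (m == 0) with hk
      set run := rest.takeWhile (fun x => (x == 0) == k) with hrun
      set rest' := rest.dropWhile (fun x => (x == 0) == k) with hrest'
      have hsplit : rest = run ++ rest' := (List.takeWhile_append_dropWhile).symm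
      have hlen' : rest'.length ≤ n := by
        have h1 : rest'.length ≤ rest.length := by
          rw [hrest']; exact List.length_dropWhile_le _ _
        simp only [List.length_cons] at hms
        omega
      have hgroups : pvGroups (m :: rest) = (k, run.length + 1) :: pvGroups rest' := by
        rw [pvGroups]
      have hrunmem : ∀ x ∈ run, ((x == 0) == k) = true := by
        intro x hx
        rw [hrun] at hx
        exact List.mem_takeWhile_imp (p := fun x => (x == 0) == k) hx
      have hms_eq : m :: rest = (m :: run) ++ rest' := by
        rw [List.cons_append, ← hsplit]
      -- if rest' is nonempty, its head has the opposite key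
      have hhead : ∀ y l, rest' = y :: l → ((y == 0) == k) = false := by
        intro y l hyl
        have := List.head?_dropWhile_not (fun x => (x == 0) == k) rest
        rw [← hrest', hyl] at this
        simpa using this
      rw [hgroups, List.any_cons, hms_eq]
      by_cases hkt : k = true
      · -- a zero-run of length run.length+1
        have hm0 : m = 0 := by rwa [hk, beq_iff_eq] at hkt
        have hall : ∀ x ∈ (m :: run), x = 0 := by
          intro x hx
          rcases List.mem_cons.mp hx with h | h
          · rw [h, hm0]
          · have := hrunmem x h
            rw [hkt] at this
            simpa using this
        rw [pvGoA_zeros t (m :: run) rest' 0 hall]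
        simp only [List.length_cons, ne_eq, List.cons_ne_nil, not_false_eq_true, true_and,
          zero_add, hkt, Bool.true_and]
        by_cases hge : ((run.length : Int) + 1) ≥ t
        · rw [if_pos (by push_cast; omega)]
          have : decide (((run.length + 1 : Nat) : Int) ≥ t) = true := by
            simp only [decide_eq_true_iff]; push_cast; omega
          rw [this, Bool.true_or]
        · rw [if_neg (by push_cast; omega)]
          have hdec : decide (((run.length + 1 : Nat) : Int) ≥ t) = false := by
            simp only [decide_eq_false_iff_not]; push_cast; omega
          rw [hdec, Bool.false_or]
          -- the counter carried into rest' is irrelevant: rest' starts nonzero (or is empty)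
          have hrest'0 : ∀ c : Int, pvGoA t rest' c = pvGoA t rest' 0 := by
            intro c
            match h : rest' with
            | [] => rfl
            | y :: l =>
              have hy : y ≠ 0 := by
                have := hhead y l rfl
                rw [hkt] at this
                simpa using this
              simp [pvGoA, hy]
          rw [hrest'0]
          exact ih rest' hlen' t
      · -- a nonzero-run
        have hkf : k = false := by revert hkt; cases k <;> simp
        have hm0 : m ≠ 0 := by
          intro h; rw [hk, h] at hkf; simp at hkf
        have hall : ∀ x ∈ (m :: run), x ≠ 0 := by
          intro x hx
          rcases List.mem_cons.mp hx with h | h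
          · rw [h]; exact hm0
          · have := hrunmem x h
            rw [hkf] at this
            simpa using this
        rw [pvGoA_nonzero t (m :: run) rest' 0 hall]
        rw [if_neg (by simp)]
        rw [hkf, Bool.false_and, Bool.false_or]
        exact ih rest' hlen' t

-- ===== VERDICT (by name: the statement is the Claim_ definition above) =====
theorem is_system_unhealthy_spec : Claim_equal_is_system_unhealthy := by
  intro ms t _
  unfold Spec_is_system_unhealthy is_system_unhealthy is_system_unhealthy_alt
  exact pvMain ms.length ms le_rfl t
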